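-- pv_equiv track=rewrite | github.com/leye195/algorithm-coding | 알고리즘 문제풀이/kakao/불량아이디.py | solution
-- ===== SOURCE A (Python) =====
-- def check_user(user,banned):
--     if len(user)==len(banned):
--         for i in range(0,len(user)):
--             if  banned[i]!="*" and user[i]!=banned[i]:
--                 return False
--             elif banned[i]=="*" or user[i]==banned[i]:
--                 continue
--         return True
--     else:
--         return False
--
-- def backtrack(answer,user_id,banned_id,visited,tmp,idx):
--     if len(tmp)==len(banned_id):
--         sorted_tmp = sorted(tmp)
--         if sorted_tmp not in answer:
--             answer.append([i for i in sorted_tmp])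
--         return
--     for i in range(0,len(user_id)):
--         if(visited[i]==0 and check_user(user_id[i],banned_id[len(tmp)])):
--             visited[i]=1
--             tmp.append(user_id[i])
--             backtrack(answer,user_id,banned_id,visited,tmp,i)
--             tmp.pop()
--             visited[i]=0
--     return
--
-- def solution(user_id, banned_id):
--     answer,visited = [],[0 for i in range(0,len(user_id))]
--     for i in range(len(user_id)):
--         if visited[i]==0 and check_user(user_id[i],banned_id[0]):
--             visited[i]=1
--             backtrack(answer,user_id,banned_id,visited,[user_id[i]],i)
--             visited[i]=0
--     return len(answer)
-- ===== SOURCE B (Python) =====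
-- def check_user(user,banned):
--     if len(user)==len(banned):
--         for i in range(0,len(user)):
--             if  banned[i]!="*" and user[i]!=banned[i]:
--                 return False
--             elif banned[i]=="*" or user[i]==banned[i]:
--                 continue
--         return True
--     else:
--         return False
--
-- def solution(user_id, banned_id):
--     n = len(user_id)
--     candidates = [[i for i in range(n) if check_user(user_id[i], pat)] for pat in banned_id]
--     combos = [()]
--     for cand in candidates:
--         combos = [c + (i,) for c in combos for i in cand if i not in c]
--     result = {tuple(sorted(user_id[i] for i in combo)) for combo in combos}
--     return len(result)
-- ===== Notes on version B (the rewrite author's own statement) =====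
-- stated objective: alternative
-- what changed: Replaces the DFS backtracking with a visited array and dedup-on-insert answer list by precomputed per-pattern candidate index lists, a breadth-first (level-by-level) product build of the distinct-index assignments, and a final set of sorted id-tuples whose size is returned.
-- outside the precondition, e.g. on solution([], []): A returns 0, B returns 1
import Mathlib
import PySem

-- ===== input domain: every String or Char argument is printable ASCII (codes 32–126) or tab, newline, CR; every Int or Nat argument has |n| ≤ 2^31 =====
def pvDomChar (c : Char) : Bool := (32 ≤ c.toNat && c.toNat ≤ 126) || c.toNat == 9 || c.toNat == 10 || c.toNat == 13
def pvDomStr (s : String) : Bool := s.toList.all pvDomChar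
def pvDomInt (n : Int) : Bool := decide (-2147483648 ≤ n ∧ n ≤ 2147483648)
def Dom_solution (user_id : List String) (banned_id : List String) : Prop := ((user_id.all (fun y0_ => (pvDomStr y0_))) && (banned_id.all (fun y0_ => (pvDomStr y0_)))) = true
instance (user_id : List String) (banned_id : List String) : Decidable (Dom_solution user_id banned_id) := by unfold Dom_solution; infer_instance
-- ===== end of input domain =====

-- B replaces the DFS-with-visited-array backtracking by precomputed per-pattern candidate index
-- lists, a breadth-first product build of the distinct-index assignments, and a final set of
-- sorted tuples; objective: alternative (same exponential worst case, far fewer check_user calls).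

-- ===== PORT A =====
-- shared helper (identical function in Source A and Source B): per-character wildcard match
def checkLoop : List Char → List Char → Bool
  | u :: us, b :: bs => if b != '*' && u != b then false else checkLoop us bs
  | _, _ => true

def check_user (user : String) (banned : String) : Bool :=
  if user.toList.length == banned.toList.length then checkLoop user.toList banned.toList
  else false

-- backtrack(answer, user_id, banned_id, visited, tmp, idx): idx is unused in A; the mutated
-- visited/tmp are restored by A before returning, so only the answer accumulator is threaded.
-- fuel = banned_id.length - tmp.length makes the same recursion structural (never exhausted
-- on the calls solution makes).
def backtrackA (user_id banned_id : List String) : Nat → List Int → List String → List (List String) → List (List String)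
  | fuel, visited, tmp, answer =>
    if tmp.length = banned_id.length then
      let st := PySem.List.sorted tmp (fun x => x) false
      if st ∈ answer then answer else answer ++ [st]
    else
      match fuel with
      | 0 => answer
      | fuel' + 1 =>
        (List.range user_id.length).foldl
          (fun ans i =>
            if (visited.getD i 0 == 0) && check_user (user_id.getD i "") (banned_id.getD tmp.length "") then
              backtrackA user_id banned_id fuel' (visited.set i 1) (tmp ++ [user_id.getD i ""]) ans
            else ans)
          answer

def solution (user_id : List String) (banned_id : List String) : Int :=
  let visited : List Int := List.replicate user_id.length 0
  let answer :=
    (List.range user_id.length).foldl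
      (fun ans i =>
        if (visited.getD i 0 == 0) && check_user (user_id.getD i "") (banned_id.getD 0 "") then
          backtrackA user_id banned_id (banned_id.length - 1) (visited.set i 1) [user_id.getD i ""] ans
        else ans)
      []
  (answer.length : Int)

-- ===== PORT B =====
-- candidates: for each pattern, the indices of the users matching it
def candsOf (user_id banned_id : List String) : List (List Nat) :=
  banned_id.map (fun pat => (List.range user_id.length).filter (fun i => check_user (user_id.getD i "") pat))

def solution_alt (user_id : List String) (banned_id : List String) : Int :=
  let candidates := candsOf user_id banned_id
  let combos :=
    candidates.foldl
      (fun combos cand =>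
        combos.flatMap (fun c => (cand.filter (fun i => !c.contains i)).map (fun i => c ++ [i])))
      [[]]
  let result : PySem.Set (List String) :=
    combos.foldl
      (fun s c => PySem.Set.add s (PySem.List.sorted (c.map (fun i => user_id.getD i "")) (fun x => x) false))
      PySem.Set.empty
  PySem.Set.len result

-- ===== PRECONDITION & SPEC =====
-- Pre_ excludes banned_id = []: there A raises IndexError on banned_id[0] whenever user_id is
-- non-empty, and on the remaining input ([], []) A's 0 and B's 1 ('one way to match zero patterns')
-- are both defensible readings of an empty ban list that no caller would specify.
def Pre_solution (user_id : List String) (banned_id : List String) : Prop := banned_id ≠ []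
instance (user_id : List String) (banned_id : List String) : Decidable (Pre_solution user_id banned_id) := by unfold Pre_solution; infer_instance
def pvWitness_solution : List String × List String := (["frodo", "fradi"], ["fr*d*"])

def Spec_solution (user_id : List String) (banned_id : List String) (out : Int) : Prop := out = solution_alt user_id banned_id
instance (user_id : List String) (banned_id : List String) (out : Int) : Decidable (Spec_solution user_id banned_id out) := by unfold Spec_solution; infer_instance

-- ===== CLAIM (what is proved, stated in full; the proofs are below) =====
def Claim_equal_solution : Prop := ∀ (user_id : List String) (banned_id : List String), Dom_solution user_id banned_id → Pre_solution user_id banned_id → Spec_solution user_id banned_id (solution user_id banned_id)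

-- ===== LEMMAS AND PROOFS =====

-- the index sequences A's DFS visits, relative to a visited array
def enumA (visited : List Int) : List (List Nat) → List (List Nat)
  | [] => [[]]
  | cand :: rest =>
      (cand.filter (fun i => visited.getD i 0 == 0)).flatMap
        (fun i => (enumA (visited.set i 1) rest).map (fun s => i :: s))

-- the index sequences B's breadth-first build produces, relative to a prefix
def dfsE : List (List Nat) → List Nat → List (List Nat)
  | [], c => [c]
  | cand :: rest, c =>
      (cand.filter (fun i => !c.contains i)).flatMap (fun i => dfsE rest (c ++ [i]))

-- append-if-new (Python 'if x not in answer: answer.append(x)')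
def stepD (ans : List (List String)) (l : List String) : List (List String) :=
  if l ∈ ans then ans else ans ++ [l]

theorem foldl_if_filter {α β : Type} (p : β → Bool) (g : α → β → α) :
    ∀ (l : List β) (a : α),
      l.foldl (fun a x => if p x then g a x else a) a = (l.filter p).foldl g a := by
  intro l
  induction l with
  | nil => intro a; rfl
  | cons x xs ih =>
      intro a
      by_cases h : p x = true
      · simp [h, ih]
      · simp [h, ih]

theorem bfs_eq_dfsE :
    ∀ (cs : List (List Nat)) (L : List (List Nat)),
      cs.foldl
        (fun combos cand =>
          combos.flatMap (fun c => (cand.filter (fun i => !c.contains i)).map (fun i => c ++ [i])))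
        L
      = L.flatMap (fun c => dfsE cs c) := by
  intro cs
  induction cs with
  | nil => intro L; simp [dfsE]
  | cons cand rest ih =>
      intro L
      rw [List.foldl_cons, ih]
      rw [List.flatMap_assoc]
      apply List.flatMap_congr
      intro c _
      simp [dfsE, List.flatMap_map]

theorem enumA_eq_dfsE (n : Nat) :
    ∀ (cs : List (List Nat)) (visited : List Int) (c : List Nat),
      visited.length = n →
      (∀ i, i < n → ((visited.getD i 0 == 0) = !c.contains i)) →
      (∀ cand ∈ cs, ∀ i ∈ cand, i < n) →
      (enumA visited cs).map (fun s => c ++ s) = dfsE cs c := by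
  intro cs
  induction cs with
  | nil => intro visited c _ _ _; simp [enumA, dfsE]
  | cons cand rest ih =>
      intro visited c hlen hfree hbound
      simp only [enumA, dfsE]
      rw [List.map_flatMap]
      have hfc : cand.filter (fun i => visited.getD i 0 == 0)
          = cand.filter (fun i => !c.contains i) := by
        apply List.filter_congr
        intro i hi
        exact hfree i (hbound cand (List.mem_cons_self) i hi)
      rw [hfc]
      apply List.flatMap_congr
      intro i hi
      rw [List.map_map]
      have hcomp : ((fun s => c ++ s) ∘ fun s => i :: s) = fun s => (c ++ [i]) ++ s := by
        funext s; simp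
      rw [hcomp]
      apply ih (visited.set i 1) (c ++ [i]) (by simp [hlen])
      · intro j hj
        by_cases hji : j = i
        · subst hji
          have hjv : j < visited.length := by omega
          simp [List.getD, hjv]
        · have : (visited.set i 1).getD j 0 = visited.getD j 0 := by
            simp [List.getD, Ne.symm hji]
          rw [this, hfree j hj]
          simp [hji]
      · intro cand' hc'
        exact hbound cand' (List.mem_cons_of_mem _ hc')

theorem backtrackA_eq (user_id banned_id : List String) :
    ∀ (cs : List (List Nat)) (tmp : List String) (visited : List Int) (ans : List (List String)),
      tmp.length + cs.length = banned_id.length →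
      (candsOf user_id banned_id).drop tmp.length = cs →
      backtrackA user_id banned_id cs.length visited tmp ans
        = ((enumA visited cs).map
            (fun s => PySem.List.sorted (tmp ++ s.map (fun i => user_id.getD i "")) (fun x => x) false)).foldl stepD ans := by
  intro cs
  induction cs with
  | nil =>
      intro tmp visited ans h1 _
      simp only [List.length_nil, Nat.add_zero] at h1
      simp [backtrackA, h1, enumA, stepD]
  | cons cand rest ih =>
      intro tmp visited ans h1 h2
      have hne : tmp.length ≠ banned_id.length := by simp at h1; omega
      -- identify the pattern at position tmp.length
      have hhead := List.head?_drop (l := candsOf user_id banned_id) (i := tmp.length)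
      rw [h2] at hhead
      simp only [List.head?_cons] at hhead
      have hpat : ∃ pat, banned_id[tmp.length]? = some pat ∧
          (List.range user_id.length).filter (fun i => check_user (user_id.getD i "") pat) = cand := by
        unfold candsOf at hhead
        rw [List.getElem?_map] at hhead
        exact Option.map_eq_some_iff.mp hhead.symm
      obtain ⟨pat, hp, hcand⟩ := hpat
      have hgd : banned_id.getD tmp.length "" = pat := by simp [List.getD, hp]
      have hrest : (candsOf user_id banned_id).drop (tmp.length + 1) = rest := by
        have := List.drop_drop (i := 1) (j := tmp.length) (l := candsOf user_id banned_id)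
        rw [h2] at this
        simpa using this.symm
      -- unfold one step of backtrackA
      show backtrackA user_id banned_id (rest.length + 1) visited tmp ans = _
      rw [backtrackA]
      simp only [if_neg hne, hgd]
      -- left side: fold over range filtered by the combined condition
      rw [foldl_if_filter (fun i => (visited.getD i 0 == 0) && check_user (user_id.getD i "") pat)]
      have hlist : (List.range user_id.length).filter
            (fun i => (visited.getD i 0 == 0) && check_user (user_id.getD i "") pat)
          = cand.filter (fun i => visited.getD i 0 == 0) := by
        rw [← hcand, List.filter_filter]
      rw [hlist]
      -- right side
      simp only [enumA]
      rw [List.map_flatMap, List.foldl_flatMap]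
      have hfun : (fun (a : List (List String)) (i : Nat) =>
            backtrackA user_id banned_id rest.length (visited.set i 1) (tmp ++ [user_id.getD i ""]) a)
          = (fun (a : List (List String)) (i : Nat) =>
            (((enumA (visited.set i 1) rest).map (fun s => i :: s)).map
              (fun s => PySem.List.sorted (tmp ++ s.map (fun i => user_id.getD i "")) (fun x => x) false)).foldl stepD a) := by
        funext a i
        rw [List.map_map]
        have hcomp : ((fun s => PySem.List.sorted (tmp ++ s.map (fun i => user_id.getD i "")) (fun x => x) false) ∘ fun s => i :: s)
            = fun s => PySem.List.sorted ((tmp ++ [user_id.getD i ""]) ++ s.map (fun j => user_id.getD j "")) (fun x => x) false := by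
          funext s; simp
        rw [hcomp]
        exact ih (tmp ++ [user_id.getD i ""]) (visited.set i 1) a
          (by simp at h1 ⊢; omega) (by simpa using hrest)
      rw [hfun]


theorem hfree_replicate (n : Nat) (i : Nat) :
    ((List.replicate n (0:Int)).getD i 0 == 0) = true := by
  simp [List.getD, List.getElem?_replicate]; split <;> simp

theorem solution_eq_fold (user_id : List String) (pat0 : String) (btail : List String) :
    solution user_id (pat0 :: btail)
      = ((((enumA (List.replicate user_id.length 0) (candsOf user_id (pat0 :: btail))).map
           (fun s => PySem.List.sorted (s.map (fun i => user_id.getD i "")) (fun x => x) false)).foldl stepD []).length : Int) := by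
  unfold solution
  apply congrArg (fun l : List (List String) => (l.length : Int))
  simp only [hfree_replicate, Bool.true_and, List.getD_cons_zero]
  rw [foldl_if_filter (fun i => check_user (user_id.getD i "") pat0)]
  simp only [candsOf, List.map_cons, enumA]
  rw [List.map_flatMap, List.foldl_flatMap]
  rw [List.filter_eq_self.mpr (fun i _ => hfree_replicate user_id.length i)]
  have hfun : (fun (a : List (List String)) (i : Nat) =>
        backtrackA user_id (pat0 :: btail) ((pat0 :: btail).length - 1)
          ((List.replicate user_id.length 0).set i 1) [user_id.getD i ""] a)
      = (fun (a : List (List String)) (i : Nat) =>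
        (((enumA ((List.replicate user_id.length 0).set i 1)
              (btail.map (fun pat => (List.range user_id.length).filter (fun j => check_user (user_id.getD j "") pat)))).map
            (fun s => i :: s)).map
          (fun s => PySem.List.sorted (s.map (fun j => user_id.getD j "")) (fun x => x) false)).foldl stepD a) := by
    funext a i
    have hlen : (pat0 :: btail).length - 1
        = (btail.map (fun pat => (List.range user_id.length).filter (fun j => check_user (user_id.getD j "") pat))).length := by
      simp
    rw [hlen]
    rw [backtrackA_eq user_id (pat0 :: btail) _ [user_id.getD i ""]
      ((List.replicate user_id.length 0).set i 1) a (by simp [Nat.add_comm]) (by simp [candsOf])]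
    rw [List.map_map]
    apply congrArg (List.foldl stepD a)
    apply List.map_congr_left
    intro s _
    simp
  rw [hfun]

theorem alt_eq_fold (user_id banned_id : List String) :
    solution_alt user_id banned_id
      = (((dfsE (candsOf user_id banned_id) []).foldl
           (fun s c => stepD s (PySem.List.sorted (c.map (fun i => user_id.getD i "")) (fun x => x) false)) []).length : Int) := by
  simp only [solution_alt]
  rw [bfs_eq_dfsE]
  have hadd : ∀ (s : List (List String)) (x : List String),
      PySem.Set.add s x = stepD s x := by
    intro s x
    simp [PySem.Set.add, PySem.Set.contains, stepD]
  simp only [List.flatMap_cons, List.flatMap_nil, List.append_nil, hadd]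
  simp [PySem.Set.len, PySem.Set.empty]

theorem candsOf_bounded (user_id banned_id : List String) :
    ∀ cand ∈ candsOf user_id banned_id, ∀ i ∈ cand, i < user_id.length := by
  intro cand hcand i hi
  unfold candsOf at hcand
  obtain ⟨pat, _, rfl⟩ := List.mem_map.mp hcand
  have := List.mem_of_mem_filter hi
  exact List.mem_range.mp this

theorem enumA_zero (user_id banned_id : List String) :
    enumA (List.replicate user_id.length 0) (candsOf user_id banned_id)
      = dfsE (candsOf user_id banned_id) [] := by
  have := enumA_eq_dfsE user_id.length (candsOf user_id banned_id)
    (List.replicate user_id.length 0) [] (by simp)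
    (by intro i _; exact hfree_replicate user_id.length i)
    (candsOf_bounded user_id banned_id)
  simpa using this

-- ===== VERDICT (by name: the statement is the Claim_ definition above) =====
theorem solution_spec : Claim_equal_solution := by
  unfold Claim_equal_solution
  intro user_id banned_id _ hpre
  unfold Spec_solution
  obtain ⟨pat0, btail, rfl⟩ : ∃ p t, banned_id = p :: t := by
    cases banned_id with
    | nil => exact absurd rfl hpre
    | cons p t => exact ⟨p, t, rfl⟩
  rw [solution_eq_fold, alt_eq_fold, enumA_zero, List.foldl_map]
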